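-- pv_equiv track=rewrite | github.com/samhotchkiss/pollypm | src/pollypm/cockpit_sections/plan_review.py | _strip_known_sections
-- ===== SOURCE A (Python) =====
-- def _strip_known_sections(plan_text: str) -> str:
--     """Drop the leading ``## Summary`` + ``## Judgment calls`` blocks.
--
--     The summary + judgment-call blocks render in their own dedicated
--     sections. Stripping them from the body keeps the rest (decomposition,
--     test strategy, critic synthesis) free of duplicate content.
--     """
--     text = (plan_text or "").strip()
--     if not text:
--         return ""
--     keep_lines: list[str] = []
--     skip = False
--     for line in text.splitlines():
--         stripped = line.strip().lower()
--         if stripped in {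
--             "## summary", "# summary", "### summary",
--             "## judgment calls", "## judgement calls",
--             "### judgment calls", "### judgement calls",
--         }:
--             skip = True
--             continue
--         if skip and stripped.startswith("#"):
--             skip = False
--         if skip:
--             continue
--         keep_lines.append(line)
--     return "\n".join(keep_lines).strip()
-- ===== SOURCE B (Python) =====
-- _KNOWN = {
--     "## summary", "# summary", "### summary",
--     "## judgment calls", "## judgement calls",
--     "### judgment calls", "### judgement calls",
-- }
--
--
-- def _strip_known_sections(plan_text: str) -> str:
--     """Group lines into header-delimited blocks, then drop the known blocks."""
--     text = (plan_text or "").strip()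
--     if not text:
--         return ""
--     blocks = [[]]
--     for line in text.splitlines():
--         if line.strip().lower().startswith("#"):
--             blocks.append([line])
--         else:
--             blocks[-1].append(line)
--     kept = [ln for b in blocks
--             if not (b and b[0].strip().lower() in _KNOWN)
--             for ln in b]
--     return "\n".join(kept).strip()
-- ===== Notes on version B (the rewrite author's own statement) =====
-- stated objective: alternative
-- what changed: Replaces A's stateful skip-flag scan with a group-then-filter pass: lines are segmented into header-delimited blocks, blocks whose header normalizes to a known Summary/Judgment string are dropped wholesale, and the rest is rejoined.
import Mathlib
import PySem

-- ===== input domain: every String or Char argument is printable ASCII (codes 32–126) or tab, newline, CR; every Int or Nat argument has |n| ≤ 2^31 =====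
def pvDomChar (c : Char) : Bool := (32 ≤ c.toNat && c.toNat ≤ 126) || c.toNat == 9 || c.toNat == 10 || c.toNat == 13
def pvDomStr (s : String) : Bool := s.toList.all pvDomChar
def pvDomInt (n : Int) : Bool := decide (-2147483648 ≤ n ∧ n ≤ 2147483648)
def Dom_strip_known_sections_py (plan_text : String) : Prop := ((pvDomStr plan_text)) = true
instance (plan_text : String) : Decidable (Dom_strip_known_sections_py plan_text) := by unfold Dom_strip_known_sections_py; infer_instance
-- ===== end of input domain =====

-- B replaces A's stateful skip-flag scan with a group-into-blocks-then-filter pass (alternative decomposition, same cost).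

-- the known-headers set (shared literal of both Pythons)
def pvKnown : List String :=
  ["## summary", "# summary", "### summary",
   "## judgment calls", "## judgement calls",
   "### judgment calls", "### judgement calls"]

-- line.strip().lower(), the normalization both Pythons apply
def pvNorm (line : String) : String := PySem.Str.lower (PySem.Str.strip line)

-- ===== PORT A =====
def pvStepA (st : List String × Bool) (line : String) : List String × Bool :=
  let stripped := pvNorm line
  if stripped ∈ pvKnown then (st.1, true)
  else
    let skip := if st.2 && PySem.Str.startswith stripped "#" then false else st.2
    if skip then (st.1, skip) else (st.1 ++ [line], skip)

def strip_known_sections_py (plan_text : String) : String :=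
  let text := PySem.Str.strip plan_text
  if text = "" then ""
  else
    let r := (PySem.Str.splitlines text).foldl pvStepA ([], false)
    PySem.Str.strip (PySem.Str.join "\n" r.1)

-- ===== PORT B =====
-- blocks[-1] mutation is transcribed as the (finished blocks, current block) pair
def pvSegStep (st : List (List String) × List String) (line : String) :
    List (List String) × List String :=
  if PySem.Str.startswith (pvNorm line) "#" then (st.1 ++ [st.2], [line])
  else (st.1, st.2 ++ [line])

-- `b and b[0].strip().lower() in _KNOWN`
def pvDrop (b : List String) : Bool :=
  match b with
  | [] => false
  | h :: _ => decide (pvNorm h ∈ pvKnown)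

def strip_known_sections_py_alt (plan_text : String) : String :=
  let text := PySem.Str.strip plan_text
  if text = "" then ""
  else
    let r := (PySem.Str.splitlines text).foldl pvSegStep ([], [])
    let blocks := r.1 ++ [r.2]
    let kept := (blocks.filter (fun b => !pvDrop b)).flatten
    PySem.Str.strip (PySem.Str.join "\n" kept)

-- ===== PRECONDITION & SPEC =====
def Spec_strip_known_sections_py (plan_text : String) (out : String) : Prop := out = strip_known_sections_py_alt plan_text
instance (plan_text : String) (out : String) : Decidable (Spec_strip_known_sections_py plan_text out) := by unfold Spec_strip_known_sections_py; infer_instance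

-- ===== CLAIM (what is proved, stated in full; the proofs are below) =====
def Claim_equal_strip_known_sections_py : Prop := ∀ (plan_text : String), Dom_strip_known_sections_py plan_text → Spec_strip_known_sections_py plan_text (strip_known_sections_py plan_text)

-- ===== LEMMAS AND PROOFS =====

-- kept lines of a finished block list
def pvKept (blocks : List (List String)) : List String :=
  (blocks.filter (fun b => !pvDrop b)).flatten

lemma pvKept_append_singleton (blocks : List (List String)) (c : List String) :
    pvKept (blocks ++ [c]) = pvKept blocks ++ (if pvDrop c then [] else c) := by
  simp [pvKept, List.filter_append]
  cases h : pvDrop c <;> simp [h]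

lemma pvKnown_startswith {s : String} (h : s ∈ pvKnown) :
    PySem.Str.startswith s "#" = true := by
  fin_cases h <;> decide

lemma pvLoopEq : ∀ (lines : List String) (blocks : List (List String)) (cur keep : List String),
    keep = pvKept blocks ++ (if pvDrop cur then [] else cur) →
    (lines.foldl pvStepA (keep, pvDrop cur)).1
      = pvKept ((lines.foldl pvSegStep (blocks, cur)).1 ++ [(lines.foldl pvSegStep (blocks, cur)).2]) := by
  intro lines
  induction lines with
  | nil =>
    intro blocks cur keep hk
    simpa [pvKept_append_singleton] using hk
  | cons line rest ih =>
    intro blocks cur keep hk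
    by_cases h1 : pvNorm line ∈ pvKnown
    · have hsw := pvKnown_startswith h1
      have hdrop : pvDrop [line] = true := by simp [pvDrop, h1]
      simp only [List.foldl_cons, pvStepA, pvSegStep, h1, hsw, if_pos]
      have := ih (blocks ++ [cur]) [line] keep
        (by rw [pvKept_append_singleton, hdrop]; simpa using hk)
      rw [hdrop] at this
      simpa using this
    · have h2' : PySem.Chars.startswith (pvNorm line).toList ['#'] = true
            ∨ PySem.Chars.startswith (pvNorm line).toList ['#'] = false := by
        cases PySem.Chars.startswith (pvNorm line).toList ['#'] <;> simp
      rcases h2' with h2 | h2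
      · have hdrop : pvDrop [line] = false := by simp [pvDrop, h1]
        have hA : pvStepA (keep, pvDrop cur) line = (keep ++ [line], false) := by
          simp [pvStepA, h1, h2]
        have hB : pvSegStep (blocks, cur) line = (blocks ++ [cur], [line]) := by
          simp [pvSegStep, h2]
        simp only [List.foldl_cons, hA, hB]
        have := ih (blocks ++ [cur]) [line] (keep ++ [line])
          (by rw [pvKept_append_singleton, hdrop]; simp [hk])
        rw [hdrop] at this
        exact this
      · have hdrop : pvDrop (cur ++ [line]) = pvDrop cur := by
          cases cur with
          | nil => simp [pvDrop, h1]
          | cons h t => simp [pvDrop]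
        have hB : pvSegStep (blocks, cur) line = (blocks, cur ++ [line]) := by
          simp [pvSegStep, h2]
        cases hc : pvDrop cur with
        | true =>
          have hA : pvStepA (keep, true) line = (keep, true) := by
            simp [pvStepA, h1, h2]
          simp only [List.foldl_cons, hA, hB]
          have := ih blocks (cur ++ [line]) keep (by rw [hdrop, hc]; simpa [hc] using hk)
          rw [hdrop, hc] at this
          exact this
        | false =>
          have hA : pvStepA (keep, false) line = (keep ++ [line], false) := by
            simp [pvStepA, h1, h2]
          simp only [List.foldl_cons, hA, hB]
          have := ih blocks (cur ++ [line]) (keep ++ [line]) (by rw [hdrop, hc]; simp [hk, hc])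
          rw [hdrop, hc] at this
          exact this

-- ===== VERDICT (by name: the statement is the Claim_ definition above) =====
theorem strip_known_sections_py_spec : Claim_equal_strip_known_sections_py := by
  intro plan_text _
  unfold Spec_strip_known_sections_py strip_known_sections_py strip_known_sections_py_alt
  by_cases h : PySem.Str.strip plan_text = ""
  · simp [h]
  · simp only [h, if_false]
    have := pvLoopEq (PySem.Str.splitlines (PySem.Str.strip plan_text)) [] [] []
      (by simp [pvKept, pvDrop])
    simp only [pvDrop] at this
    rw [this]
    rfl
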